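-- pv_equiv track=rewrite | github.com/davepetrov/CSCA08 | club_functions.py | get_last_to_first
-- ===== SOURCE A (Python) =====
-- from typing import List, Tuple, Dict, TextIO
--
-- def update_dict(key: str, value: str,
--                 key_to_values: Dict[str, List[str]]) -> None:
--     """Update key_to_values with key/value. If key is in key_to_values,
--     and value is not already in the list associated with key,
--     append value to the list. Otherwise, add the pair key/[value] to
--     key_to_values.
--
--     >>> d = {'1': ['a', 'b']}
--     >>> update_dict('2', 'c', d)
--     >>> d == {'1': ['a', 'b'], '2': ['c']}
--     True
--     >>> update_dict('1', 'c', d)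
--     >>> d == {'1': ['a', 'b', 'c'], '2': ['c']}
--     True
--     >>> update_dict('1', 'c', d)
--     >>> d == {'1': ['a', 'b', 'c'], '2': ['c']}
--     True
--     """
--
--     if key not in key_to_values:
--         key_to_values[key] = []
--
--     if value not in key_to_values[key]:
--         key_to_values[key].append(value)
--
-- def get_last_to_first(
--         person_to_friends: Dict[str, List[str]]) -> Dict[str, List[str]]:
--     """Return a "last name to first name(s)" dictionary with the people
--     from the "person to friends" dictionary person_to_friends.
--
--     >>> get_last_to_first(P2F) == {
--     ...    'Katsopolis': ['Jesse'],
--     ...    'Tanner': ['Danny R', 'Michelle', 'Stephanie J'],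
--     ...    'Gladstone': ['Joey'],
--     ...    'Donaldson-Katsopolis': ['Rebecca'],
--     ...    'Gibbler': ['Kimmy'],
--     ...    'Tanner-Fuller': ['DJ']}
--     True
--
--     """
--     names = []
--     last_to_first = {}
--     for person in person_to_friends:
--         names.append(person)
--         for friend in person_to_friends[person]:
--             if friend not in names and len(friend) != 0:
--                 names.append(friend)
--
--     for name in names:
--         last = name[name.rfind(' ') + 1:]
--         first = name[:name.rfind(' ')]
--         update_dict(last, first, last_to_first)
--         last_to_first[last].sort()
--
--     return last_to_first
-- ===== SOURCE B (Python) =====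
-- def get_last_to_first(person_to_friends):
--     """Return a "last name to first name(s)" dictionary with the people
--     from the "person to friends" dictionary person_to_friends."""
--     names = []
--     for person, friends in person_to_friends.items():
--         names.append(person)
--         names.extend(f for f in friends if f)
--
--     def split(name):
--         cut = name.rfind(' ')
--         return name[cut + 1:], name[:cut]
--
--     # One global sort by (last, first); equal keys become adjacent, so one
--     # linear pass groups the first names per last name, already in order
--     # and with duplicates dropped by comparing against the previous entry.
--     grouped = {}
--     for name in sorted(names, key=split):
--         last, first = split(name)
--         if last not in grouped:
--             grouped[last] = [first]
--         elif grouped[last][-1] != first: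
--             grouped[last].append(first)
--
--     # Re-emit the groups keyed in first-occurrence order of the last names.
--     return {split(name)[0]: grouped[split(name)[0]] for name in names}
-- ===== Notes on version B (the rewrite author's own statement) =====
-- stated objective: faster
-- what changed: A dedups friends with a linear 'not in names' scan and, per name, runs update_dict (membership scan + append) and re-sorts that key's whole list; B does one global sort of all names keyed by (last, first), then a single linear pass that groups consecutive equal lasts (dropping a first equal to the previous one), and finally re-emits the groups keyed in first-occurrence order.
import Mathlib
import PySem

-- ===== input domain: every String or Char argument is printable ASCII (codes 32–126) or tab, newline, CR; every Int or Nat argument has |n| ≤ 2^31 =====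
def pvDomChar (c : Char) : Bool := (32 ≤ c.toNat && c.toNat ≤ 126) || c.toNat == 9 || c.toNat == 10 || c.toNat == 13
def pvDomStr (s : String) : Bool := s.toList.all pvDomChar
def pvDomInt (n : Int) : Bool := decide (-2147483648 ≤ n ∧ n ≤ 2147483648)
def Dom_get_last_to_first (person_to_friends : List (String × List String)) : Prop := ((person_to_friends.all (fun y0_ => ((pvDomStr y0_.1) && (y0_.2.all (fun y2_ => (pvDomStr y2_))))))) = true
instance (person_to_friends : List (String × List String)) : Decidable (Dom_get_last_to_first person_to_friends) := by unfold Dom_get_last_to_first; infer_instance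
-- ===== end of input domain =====

-- B replaces A's per-name dict-update-with-membership-scan-and-resort loop by one global
-- sort of the names keyed by (last, first) followed by a single linear grouping pass
-- (consecutive duplicates dropped) and a re-emit in first-occurrence key order (faster).

-- ===== PORT A =====
def update_dict (key : String) (value : String)
    (key_to_values : PySem.Dict String (List String)) : PySem.Dict String (List String) :=
  -- if key not in key_to_values: key_to_values[key] = []
  let d := if key_to_values.contains key then key_to_values else key_to_values.insert key []
  -- if value not in key_to_values[key]: key_to_values[key].append(value)
  if value ∈ d.getD key [] then d else d.insert key (d.getD key [] ++ [value])

def get_last_to_first (person_to_friends : List (String × List String)) : List (String × List String) :=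
  let names : List String := person_to_friends.foldl (fun names p =>
      let names := names ++ [p.1]
      p.2.foldl (fun names friend =>
        if friend ∉ names ∧ PySem.Str.len friend ≠ 0 then names ++ [friend] else names) names) []
  let last_to_first := names.foldl (fun d name =>
      let lastn := PySem.Str.slice name (some (PySem.Str.rfind name " " + 1)) none
      let firstn := PySem.Str.slice name none (some (PySem.Str.rfind name " "))
      let d := update_dict lastn firstn d
      -- last_to_first[last].sort()
      d.modify lastn [] (fun l => PySem.List.sorted l (fun x => x) false)) PySem.Dict.empty
  last_to_first.items

-- ===== PORT B =====
-- def split(name): cut = name.rfind(' '); return name[cut+1:], name[:cut]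
def splitName (name : String) : String × String :=
  let cut := PySem.Str.rfind name " "
  (PySem.Str.slice name (some (cut + 1)) none, PySem.Str.slice name none (some cut))

def get_last_to_first_alt (person_to_friends : List (String × List String)) : List (String × List String) :=
  let names : List String := person_to_friends.foldl (fun names p =>
      names ++ [p.1] ++ p.2.filter (fun f => decide (f ≠ ""))) []
  -- for name in sorted(names, key=split): group firsts per last, dropping a first equal
  -- to the previous entry of its group (grouped[last][-1]; that list is never empty)
  let grouped : PySem.Dict String (List String) :=
    (PySem.List.sorted2 names (fun n => (splitName n).1) (fun n => (splitName n).2) false).foldl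
      (fun g name =>
        if g.contains (splitName name).1 = false then
          g.insert (splitName name).1 [(splitName name).2]
        else if PySem.List.pyGetD (g.getD (splitName name).1 []) (-1) "" ≠ (splitName name).2 then
          g.insert (splitName name).1 (g.getD (splitName name).1 [] ++ [(splitName name).2])
        else g)
      PySem.Dict.empty
  -- {split(name)[0]: grouped[split(name)[0]] for name in names}
  -- grouped[k]: the key is always present (exact: ports Python's d[k] on a hit)
  (names.foldl (fun d n =>
      d.insert (splitName n).1 ((grouped.get? (splitName n).1).getD [])) PySem.Dict.empty).items

-- ===== PRECONDITION & SPEC =====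
def Spec_get_last_to_first (person_to_friends : List (String × List String)) (out : List (String × List String)) : Prop := out = get_last_to_first_alt person_to_friends
instance (person_to_friends : List (String × List String)) (out : List (String × List String)) : Decidable (Spec_get_last_to_first person_to_friends out) := by unfold Spec_get_last_to_first; infer_instance

-- ===== CLAIM (what is proved, stated in full; the proofs are below) =====
def Claim_equal_get_last_to_first : Prop := ∀ (person_to_friends : List (String × List String)), Dom_get_last_to_first person_to_friends → Spec_get_last_to_first person_to_friends (get_last_to_first person_to_friends)

-- ===== LEMMAS AND PROOFS =====

-- the split of a full name at its last space, as both ports compute it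
def pvLast (n : String) : String := (splitName n).1
def pvFirst (n : String) : String := (splitName n).2

-- one step of A's second loop; pvStepS is an abstract set-grouping loop used to
-- characterise A's dict (keys in first-occurrence order, values = first-name sets)
def pvStepA (d : PySem.Dict String (List String)) (n : String) : PySem.Dict String (List String) :=
  (update_dict (pvLast n) (pvFirst n) d).modify (pvLast n) [] (fun l => PySem.List.sorted l (fun x => x) false)

def pvStepS (g : PySem.Dict String (PySem.Set String)) (n : String) : PySem.Dict String (PySem.Set String) :=
  g.modify (pvLast n) PySem.Set.empty (fun s => PySem.Set.add s (pvFirst n))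

-- one step of B's grouping pass
def pvStepB (g : PySem.Dict String (List String)) (name : String) : PySem.Dict String (List String) :=
  if g.contains (pvLast name) = false then g.insert (pvLast name) [pvFirst name]
  else if PySem.List.pyGetD (g.getD (pvLast name) []) (-1) "" ≠ pvFirst name then
    g.insert (pvLast name) (g.getD (pvLast name) [] ++ [pvFirst name])
  else g

-- the two name-collection folds
def pvFriendsA (fs : List String) (acc : List String) : List String :=
  fs.foldl (fun names friend =>
    if friend ∉ names ∧ PySem.Str.len friend ≠ 0 then names ++ [friend] else names) acc

def pvNamesA (ptf : List (String × List String)) : List String :=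
  ptf.foldl (fun names p => pvFriendsA p.2 (names ++ [p.1])) []

def pvNamesB (ptf : List (String × List String)) : List String :=
  ptf.foldl (fun names p => names ++ [p.1] ++ p.2.filter (fun f => decide (f ≠ ""))) []

-- the lexicographic (last, first) order B sorts by, and its Bool comparator
def pvRle (a b : String) : Prop :=
  pvLast a < pvLast b ∨ (pvLast a = pvLast b ∧ pvFirst a ≤ pvFirst b)

def pvBf (a b : String) : Bool :=
  decide (pvLast a < pvLast b) || (!decide (pvLast b < pvLast a) && decide (pvFirst a < pvFirst b))

lemma pv_len_ne_zero (f : String) : (PySem.Str.len f ≠ 0) ↔ f ≠ "" := by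
  rw [PySem.Str.len_eq]; simp

lemma pv_add_eq_append (s : PySem.Set String) (x : String) :
    PySem.Set.add s x = if x ∈ s then s else s ++ [x] := by
  simp [PySem.Set.add, PySem.Set.contains]

lemma pv_empty_eq : (PySem.Set.empty : PySem.Set String) = ([] : List String) := rfl

-- the two name collections contain the same distinct names in the same first-occurrence order
lemma pv_friendsA_ofList (fs : List String) (acc acc' : List String)
    (h : PySem.Set.ofList acc = PySem.Set.ofList acc') :
    PySem.Set.ofList (pvFriendsA fs acc)
      = PySem.Set.ofList (acc' ++ fs.filter (fun f => decide (f ≠ ""))) := by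
  induction fs generalizing acc acc' with
  | nil => simpa [pvFriendsA] using h
  | cons f fs ih =>
    simp only [pvFriendsA, List.foldl_cons, List.filter_cons]
    by_cases hne : f = ""
    · subst hne
      rw [if_neg (by simp : ¬(("" : String) ∉ acc ∧ PySem.Str.len "" ≠ 0))]
      simpa [pvFriendsA] using ih acc acc' h
    · have hstep : PySem.Set.ofList (if f ∉ acc ∧ PySem.Str.len f ≠ 0 then acc ++ [f] else acc)
          = PySem.Set.ofList (acc' ++ [f]) := by
        rw [PySem.Set.ofList_append_singleton, ← h]
        by_cases hm : f ∈ acc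
        · rw [if_neg (by simp [hm]), pv_add_eq_append]
          simp [PySem.Set.mem_ofList, hm]
        · rw [if_pos ⟨hm, (pv_len_ne_zero f).mpr hne⟩, PySem.Set.ofList_append_singleton]
      have h2 := ih _ (acc' ++ [f]) hstep
      rw [show (decide (f ≠ "")) = true by simp [hne]]
      simpa [pvFriendsA, List.append_assoc, pv_len_ne_zero] using h2

lemma pv_names_ofList_gen (ptf : List (String × List String)) (acc acc' : List String)
    (h : PySem.Set.ofList acc = PySem.Set.ofList acc') :
    PySem.Set.ofList (ptf.foldl (fun names p => pvFriendsA p.2 (names ++ [p.1])) acc)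
      = PySem.Set.ofList (ptf.foldl (fun names p => names ++ [p.1] ++ p.2.filter (fun f => decide (f ≠ ""))) acc') := by
  induction ptf generalizing acc acc' with
  | nil => simpa using h
  | cons p ptf ih =>
    simp only [List.foldl_cons]
    refine ih _ _ ?_
    have : PySem.Set.ofList (acc ++ [p.1]) = PySem.Set.ofList (acc' ++ [p.1]) := by
      rw [PySem.Set.ofList_append_singleton, PySem.Set.ofList_append_singleton, h]
    exact pv_friendsA_ofList _ _ _ this

lemma pv_names_ofList (ptf : List (String × List String)) :
    PySem.Set.ofList (pvNamesA ptf) = PySem.Set.ofList (pvNamesB ptf) :=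
  pv_names_ofList_gen ptf [] [] rfl

-- deduplication before mapping does not change the resulting ordered set
lemma pv_ofList_map_dedup (l : List String) (f : String → String) :
    PySem.Set.ofList ((PySem.List.dedup l).map f) = PySem.Set.ofList (l.map f) := by
  rw [PySem.List.dedup_eq_ofList]
  induction l using List.reverseRecOn with
  | nil => simp [PySem.Set.ofList]
  | append_singleton l x ih =>
    rw [PySem.Set.ofList_append_singleton]
    by_cases hm : x ∈ PySem.Set.ofList l
    · have : (PySem.Set.ofList l).add x = PySem.Set.ofList l := by
        simp [PySem.Set.add, PySem.Set.contains, hm]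
      rw [this, ih, List.map_append, List.map_singleton, PySem.Set.ofList_append_singleton]
      have : f x ∈ PySem.Set.ofList (l.map f) := by
        rw [PySem.Set.mem_ofList] at hm ⊢
        exact List.mem_map_of_mem hm
      simp [PySem.Set.add, PySem.Set.contains, this]
    · have : (PySem.Set.ofList l).add x = PySem.Set.ofList l ++ [x] := by
        simp [PySem.Set.add, PySem.Set.contains, hm]
      rw [this, List.map_append, List.map_singleton, PySem.Set.ofList_append_singleton,
        ih, List.map_append, List.map_singleton, PySem.Set.ofList_append_singleton]

-- characterisation of the abstract set-grouping fold: keys and per-key first-name sets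
lemma pv_charS (ns : List String) (g : PySem.Dict String (PySem.Set String)) :
    (ns.foldl pvStepS g).keys = PySem.Set.update g.keys (ns.map pvLast)
    ∧ ∀ k, (ns.foldl pvStepS g).getD k []
        = PySem.Set.update (g.getD k []) ((ns.filter (fun n => pvLast n == k)).map pvFirst) := by
  induction ns generalizing g with
  | nil => simp [PySem.Set.update]
  | cons n ns ih =>
    simp only [List.foldl_cons, List.map_cons, List.filter_cons]
    obtain ⟨ihk, ihv⟩ := ih (pvStepS g n)
    constructor
    · rw [ihk, PySem.Set.update_cons]
      congr 1
      rw [pvStepS, PySem.Dict.keys_modify]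
      by_cases hc : g.contains (pvLast n)
      · rw [PySem.Dict.keys_insert_of_contains _ _ hc]
        simp [PySem.Set.add, PySem.Set.contains,
          (PySem.Dict.contains_iff_mem_keys g (pvLast n)).mp hc]
      · rw [PySem.Dict.keys_insert_of_not_contains _ _ (by simpa using hc)]
        have : pvLast n ∉ g.keys := by
          intro hmem
          exact hc ((PySem.Dict.contains_iff_mem_keys g (pvLast n)).mpr hmem)
        simp [PySem.Set.add, PySem.Set.contains, this]
    · intro k
      rw [ihv k]
      by_cases hk : pvLast n = k
      · subst hk
        simp only [beq_self_eq_true, if_pos]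
        rw [List.map_cons, PySem.Set.update_cons]
        congr 1
        rw [pvStepS]
        have := PySem.Dict.getD_modify_self g (pvLast n) PySem.Set.empty
          (fun s => PySem.Set.add s (pvFirst n))
        simpa using this
      · rw [if_neg (by simpa using hk)]
        congr 1
        rw [pvStepS]
        exact PySem.Dict.getD_modify_of_ne g _ _ (Ne.symm hk)

-- one step: A's dict stays the per-key-sorted view of the set-grouping dict
lemma pv_stepAS (d : PySem.Dict String (List String)) (g : PySem.Dict String (PySem.Set String))
    (n : String) (hk : d.keys = g.keys)
    (hv : ∀ k, d.getD k [] = PySem.List.sorted (g.getD k []) (fun x => x) false) :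
    (pvStepA d n).keys = (pvStepS g n).keys
    ∧ ∀ k, (pvStepA d n).getD k []
        = PySem.List.sorted ((pvStepS g n).getD k []) (fun x => x) false := by
  have hcont : d.contains (pvLast n) = g.contains (pvLast n) := by
    rw [PySem.Dict.contains_eq_decide_mem_keys, PySem.Dict.contains_eq_decide_mem_keys, hk]
  have hBgetD : (pvStepS g n).getD (pvLast n) []
      = PySem.Set.add (g.getD (pvLast n) []) (pvFirst n) := by
    have := PySem.Dict.getD_modify_self g (pvLast n) PySem.Set.empty
      (fun s => PySem.Set.add s (pvFirst n))
    simpa [pvStepS, pv_empty_eq] using this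
  have hBgetD' : ∀ k, k ≠ pvLast n → (pvStepS g n).getD k [] = g.getD k [] := by
    intro k hkn
    have := PySem.Dict.getD_modify_of_ne g (k' := k) (k := pvLast n) PySem.Set.empty
      (fun s => PySem.Set.add s (pvFirst n)) hkn
    simpa [pvStepS, pv_empty_eq] using this
  by_cases hgc : g.contains (pvLast n) = true
  · -- key already present
    have hdc : d.contains (pvLast n) = true := by rw [hcont]; exact hgc
    have hBkeys : (pvStepS g n).keys = g.keys := by
      rw [pvStepS, PySem.Dict.keys_modify, PySem.Dict.keys_insert_of_contains _ _ hgc]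
    have hcur : d.getD (pvLast n) []
        = PySem.List.sorted (g.getD (pvLast n) []) (fun x => x) false := hv _
    by_cases hf : pvFirst n ∈ d.getD (pvLast n) []
    · -- first already recorded: A only re-sorts, the set add is a no-op
      have hfg : pvFirst n ∈ g.getD (pvLast n) [] := by
        rw [hcur, PySem.List.mem_sorted] at hf; exact hf
      have hadd : PySem.Set.add (g.getD (pvLast n) []) (pvFirst n) = g.getD (pvLast n) [] := by
        simp [PySem.Set.add, PySem.Set.contains, hfg]
      have hA : pvStepA d n = d.modify (pvLast n) [] (fun l => PySem.List.sorted l (fun x => x) false) := by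
        rw [pvStepA, update_dict]
        simp only [hdc, if_true, if_pos hf]
      constructor
      · rw [hA, PySem.Dict.keys_modify, PySem.Dict.keys_insert_of_contains _ _ hdc, hBkeys, hk]
      · intro k
        by_cases hkn : k = pvLast n
        · subst hkn
          rw [hA, PySem.Dict.getD_modify_self, hBgetD, hadd, hcur, PySem.List.sorted_sorted]
        · rw [hA, PySem.Dict.getD_modify_of_ne _ _ _ hkn, hBgetD' k hkn, hv k]
    · -- a new first name for an existing key
      have hfg : pvFirst n ∉ g.getD (pvLast n) [] := by
        rw [hcur, PySem.List.mem_sorted] at hf; exact hf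
      have hadd : PySem.Set.add (g.getD (pvLast n) []) (pvFirst n)
          = g.getD (pvLast n) [] ++ [pvFirst n] := by
        simp [PySem.Set.add, PySem.Set.contains, hfg]
      have hA : pvStepA d n = (d.insert (pvLast n) (d.getD (pvLast n) [] ++ [pvFirst n])).modify
          (pvLast n) [] (fun l => PySem.List.sorted l (fun x => x) false) := by
        rw [pvStepA, update_dict]
        simp only [hdc, if_true, if_neg hf]
      have hdc2 : (d.insert (pvLast n) (d.getD (pvLast n) [] ++ [pvFirst n])).contains (pvLast n) = true :=
        PySem.Dict.contains_insert_self _ _ _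
      constructor
      · rw [hA, PySem.Dict.keys_modify, PySem.Dict.keys_insert_of_contains _ _ hdc2,
          PySem.Dict.keys_insert_of_contains _ _ hdc, hBkeys, hk]
      · intro k
        by_cases hkn : k = pvLast n
        · subst hkn
          rw [hA, PySem.Dict.getD_modify_self, PySem.Dict.getD_insert_self, hBgetD, hadd, hcur]
          exact PySem.List.sorted_eq_sorted_of_perm _ _ _ (fun a b h => h)
            (((PySem.List.sorted_perm (g.getD (pvLast n) []) (fun x => x) false)).append_right _)
        · rw [hA, PySem.Dict.getD_modify_of_ne _ _ _ hkn,
            PySem.Dict.getD_insert_of_ne _ _ _ hkn, hBgetD' k hkn, hv k]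
  · -- a fresh last name: both append it
    have hgc' : g.contains (pvLast n) = false := by simpa using hgc
    have hdc : d.contains (pvLast n) = false := by rw [hcont]; exact hgc'
    have hgD : g.getD (pvLast n) [] = [] := by
      have := PySem.Dict.getD_of_not_contains g (k := pvLast n) PySem.Set.empty hgc'
      simpa [pv_empty_eq] using this
    have hBkeys : (pvStepS g n).keys = g.keys ++ [pvLast n] := by
      rw [pvStepS, PySem.Dict.keys_modify, PySem.Dict.keys_insert_of_not_contains _ _ hgc']
    have hA : pvStepA d n = (d.insert (pvLast n) [pvFirst n]).modify
        (pvLast n) [] (fun l => PySem.List.sorted l (fun x => x) false) := by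
      rw [pvStepA, update_dict]
      simp only [hdc, if_false, Bool.false_eq_true, PySem.Dict.getD_insert_self,
        List.not_mem_nil, List.nil_append, PySem.Dict.insert_insert_self]
    have hdc2 : (d.insert (pvLast n) [pvFirst n]).contains (pvLast n) = true :=
      PySem.Dict.contains_insert_self _ _ _
    constructor
    · rw [hA, PySem.Dict.keys_modify, PySem.Dict.keys_insert_of_contains _ _ hdc2,
        PySem.Dict.keys_insert_of_not_contains _ _ hdc, hBkeys, hk]
    · intro k
      by_cases hkn : k = pvLast n
      · subst hkn
        rw [hA, PySem.Dict.getD_modify_self, PySem.Dict.getD_insert_self, hBgetD, hgD]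
        rfl
      · rw [hA, PySem.Dict.getD_modify_of_ne _ _ _ hkn,
          PySem.Dict.getD_insert_of_ne _ _ _ hkn, hBgetD' k hkn, hv k]

lemma pv_invAS (ns : List String) (d : PySem.Dict String (List String))
    (g : PySem.Dict String (PySem.Set String))
    (hk : d.keys = g.keys)
    (hv : ∀ k, d.getD k [] = PySem.List.sorted (g.getD k []) (fun x => x) false) :
    (ns.foldl pvStepA d).keys = (ns.foldl pvStepS g).keys
    ∧ ∀ k, (ns.foldl pvStepA d).getD k []
        = PySem.List.sorted ((ns.foldl pvStepS g).getD k []) (fun x => x) false := by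
  induction ns generalizing d g with
  | nil => exact ⟨hk, hv⟩
  | cons n ns ih =>
    obtain ⟨h1, h2⟩ := pv_stepAS d g n hk hv
    exact ih _ _ h1 h2

-- B SIDE: the sorted2 comparator orders names by pvRle
lemma pv_bf_true {a b : String} (h : pvBf a b = true) : pvRle a b := by
  unfold pvBf at h
  unfold pvRle
  rcases Bool.or_eq_true_iff.mp h with h1 | h2
  · exact Or.inl (of_decide_eq_true h1)
  · obtain ⟨h2a, h2b⟩ := Bool.and_eq_true_iff.mp h2
    have hnb : ¬ pvLast b < pvLast a := by simpa using h2a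
    rcases le_or_gt (pvLast b) (pvLast a) with hle | hlt
    · exact Or.inr ⟨le_antisymm (le_of_not_gt hnb) hle, le_of_lt (of_decide_eq_true h2b)⟩
    · exact Or.inl hlt

lemma pv_bf_false {a b : String} (h : pvBf a b = false) : pvRle b a := by
  unfold pvBf at h
  unfold pvRle
  rcases Bool.or_eq_false_iff.mp h with ⟨h1, h2⟩
  have h1' : ¬ pvLast a < pvLast b := by simpa using h1
  rcases Bool.and_eq_false_iff.mp h2 with h2a | h2b
  · have h2a' : pvLast b < pvLast a := by
      by_contra hno
      simp [hno] at h2a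
    exact Or.inl h2a'
  · have h2b' : ¬ pvFirst a < pvFirst b := by simpa using h2b
    rcases le_or_gt (pvLast a) (pvLast b) with hle | hlt
    · exact Or.inr ⟨le_antisymm (le_of_not_gt h1') hle, le_of_not_gt h2b'⟩
    · exact Or.inl hlt

lemma pv_rle_trans {a b c : String} (h1 : pvRle a b) (h2 : pvRle b c) : pvRle a c := by
  unfold pvRle at *
  rcases h1 with h1 | ⟨h1e, h1f⟩ <;> rcases h2 with h2 | ⟨h2e, h2f⟩
  · exact Or.inl (lt_trans h1 h2)
  · exact Or.inl (h2e ▸ h1)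
  · exact Or.inl (h1e ▸ h2)
  · exact Or.inr ⟨h1e.trans h2e, le_trans h1f h2f⟩

lemma pv_insertBy_pairwise (x : String) (ys : List String)
    (h : ys.Pairwise pvRle) :
    (PySem.List.insertBy pvBf x ys).Pairwise pvRle := by
  induction ys with
  | nil => simp [PySem.List.insertBy]
  | cons y ys ih =>
    rw [List.pairwise_cons] at h
    obtain ⟨hy, hys⟩ := h
    rw [PySem.List.insertBy]
    by_cases hb : pvBf x y = true
    · rw [if_pos hb]
      refine List.pairwise_cons.mpr ⟨?_, List.pairwise_cons.mpr ⟨hy, hys⟩⟩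
      intro z hz
      rcases List.mem_cons.mp hz with rfl | hz
      · exact pv_bf_true hb
      · exact pv_rle_trans (pv_bf_true hb) (hy z hz)
    · rw [if_neg hb]
      refine List.pairwise_cons.mpr ⟨?_, ih hys⟩
      intro z hz
      rcases (PySem.List.mem_insertBy _ _ _ _).mp hz with rfl | hz
      · exact pv_bf_false (by simpa using hb)
      · exact hy z hz

lemma pv_sorted2_pairwise_gen (xs acc : List String) (hacc : acc.Pairwise pvRle) :
    (xs.foldl (fun acc x => PySem.List.insertBy pvBf x acc) acc).Pairwise pvRle := by
  induction xs generalizing acc with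
  | nil => exact hacc
  | cons x xs ih => exact ih _ (pv_insertBy_pairwise x acc hacc)

-- in a strictly increasing list every element is at most the last one
lemma pv_le_getLast (L : List String) :
    L.Pairwise (· < ·) → ∀ x ∈ L, ∀ h : L ≠ [], x ≤ L.getLast h := by
  induction L with
  | nil => intro _ x hx; cases hx
  | cons a L ih =>
    intro hL x hx h
    rw [List.pairwise_cons] at hL
    obtain ⟨ha, hL'⟩ := hL
    cases L with
    | nil =>
      have : x = a := List.mem_singleton.mp hx
      subst this
      simp [List.getLast]
    | cons b L' =>
      rw [List.getLast_cons (by simp : (b :: L') ≠ [])]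
      rcases List.mem_cons.mp hx with rfl | hx'
      · exact le_of_lt (ha _ (List.getLast_mem _))
      · exact ih hL' x hx' (by simp)

-- characterisation of B's grouping pass over a (last, first)-sorted list
lemma pv_group_char (S : List String) (g : PySem.Dict String (List String))
    (hS : S.Pairwise pvRle)
    (hval : ∀ k, (g.getD k []).Pairwise (· < ·))
    (hcross : ∀ k x, x ∈ g.getD k [] → ∀ n ∈ S, pvLast n = k → x ≤ pvFirst n)
    (hc0 : ∀ k, g.contains k = false → g.getD k [] = [])
    (hc1 : ∀ k, g.contains k = true → g.getD k [] ≠ []) :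
    ∀ k, ((S.foldl pvStepB g).getD k []).Pairwise (· < ·)
      ∧ ∀ x, (x ∈ (S.foldl pvStepB g).getD k [] ↔
          x ∈ g.getD k [] ∨ ∃ n ∈ S, pvLast n = k ∧ pvFirst n = x) := by
  induction S generalizing g with
  | nil =>
    intro k
    exact ⟨hval k, fun x => by simp⟩
  | cons n S ih =>
    rw [List.pairwise_cons] at hS
    obtain ⟨hn, hS'⟩ := hS
    -- the head only pushes firsts that every later same-last name dominates
    have hhead : ∀ m ∈ S, pvLast m = pvLast n → pvFirst n ≤ pvFirst m := by
      intro m hm hlm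
      rcases hn m hm with hlt | ⟨_, hle⟩
      · exact absurd (hlm ▸ hlt) (lt_irrefl _)
      · exact hle
    simp only [List.foldl_cons]
    by_cases hc : g.contains (pvLast n) = true
    · have hL : g.getD (pvLast n) [] ≠ [] := hc1 _ hc
      have hstep0 : pvStepB g n =
          if (g.getD (pvLast n) []).getLast hL ≠ pvFirst n then
            g.insert (pvLast n) (g.getD (pvLast n) [] ++ [pvFirst n])
          else g := by
        rw [pvStepB, if_neg (by simp [hc]), PySem.List.pyGetD_neg_one _ _ hL]
      by_cases ht : (g.getD (pvLast n) []).getLast hL = pvFirst n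
      · -- duplicate first: the step is a no-op and the head is absorbed
        have hstep : pvStepB g n = g := by rw [hstep0, if_neg (by simp [ht])]
        rw [hstep]
        have hfin : pvFirst n ∈ g.getD (pvLast n) [] := ht ▸ List.getLast_mem hL
        have := ih g hS' hval
          (fun k x hx m hm hlm => hcross k x hx m (List.mem_cons_of_mem n hm) hlm) hc0 hc1
        intro k
        refine ⟨(this k).1, fun x => ?_⟩
        rw [(this k).2 x]
        constructor
        · rintro (hx | hex)
          · exact Or.inl hx
          · exact Or.inr (by obtain ⟨m, hm, h1, h2⟩ := hex; exact ⟨m, List.mem_cons_of_mem n hm, h1, h2⟩)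
        · rintro (hx | ⟨m, hm, h1, h2⟩)
          · exact Or.inl hx
          · rcases List.mem_cons.mp hm with rfl | hm'
            · exact Or.inl (h1 ▸ h2 ▸ hfin)
            · exact Or.inr ⟨m, hm', h1, h2⟩
      · -- a new first for an existing last: append it
        have hstep : pvStepB g n
            = g.insert (pvLast n) (g.getD (pvLast n) [] ++ [pvFirst n]) := by
          rw [hstep0, if_pos (by simp [ht])]
        have hle : ∀ x ∈ g.getD (pvLast n) [], x ≤ pvFirst n := by
          intro x hx
          exact hcross _ x hx n (List.mem_cons_self) rfl
        have hnotmem : pvFirst n ∉ g.getD (pvLast n) [] := by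
          intro hmem
          have h1 : pvFirst n ≤ (g.getD (pvLast n) []).getLast hL :=
            pv_le_getLast _ (hval _) _ hmem hL
          have h2 : (g.getD (pvLast n) []).getLast hL ≤ pvFirst n :=
            hle _ (List.getLast_mem hL)
          exact ht (le_antisymm h2 h1)
        have hltf : ∀ x ∈ g.getD (pvLast n) [], x < pvFirst n := by
          intro x hx
          exact lt_of_le_of_ne (hle x hx) (fun he => hnotmem (he ▸ hx))
        set g' := g.insert (pvLast n) (g.getD (pvLast n) [] ++ [pvFirst n]) with hg'
        have hg'getD : ∀ k, g'.getD k []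
            = if k = pvLast n then g.getD (pvLast n) [] ++ [pvFirst n] else g.getD k [] := by
          intro k
          by_cases hk : k = pvLast n
          · rw [if_pos hk, hk, hg', PySem.Dict.getD_insert_self]
          · rw [if_neg hk, hg', PySem.Dict.getD_insert_of_ne _ _ _ hk]
        have hval' : ∀ k, (g'.getD k []).Pairwise (· < ·) := by
          intro k
          rw [hg'getD k]
          by_cases hk : k = pvLast n
          · rw [if_pos hk]
            refine List.pairwise_append.mpr ⟨hval _, List.pairwise_singleton _ _, ?_⟩
            intro x hx y hy
            rcases List.mem_singleton.mp hy with rfl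
            exact hltf x hx
          · rw [if_neg hk]; exact hval k
        have hcross' : ∀ k x, x ∈ g'.getD k [] → ∀ m ∈ S, pvLast m = k → x ≤ pvFirst m := by
          intro k x hx m hm hlm
          rw [hg'getD k] at hx
          by_cases hk : k = pvLast n
          · rw [if_pos hk] at hx
            rcases List.mem_append.mp hx with hx' | hx'
            · exact hcross _ x (hk ▸ hx') m (List.mem_cons_of_mem n hm) hlm
            · rcases List.mem_singleton.mp hx' with rfl
              exact hhead m hm (hk ▸ hlm)
          · rw [if_neg hk] at hx
            exact hcross k x hx m (List.mem_cons_of_mem n hm) hlm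
        have hc0' : ∀ k, g'.contains k = false → g'.getD k [] = [] := by
          intro k hk
          rw [hg', PySem.Dict.contains_insert] at hk
          rcases Bool.or_eq_false_iff.mp hk with ⟨hk1, hk2⟩
          have hkn : k ≠ pvLast n := by simpa using hk1
          rw [hg'getD k, if_neg hkn]
          exact hc0 k hk2
        have hc1' : ∀ k, g'.contains k = true → g'.getD k [] ≠ [] := by
          intro k hk
          rw [hg'getD k]
          by_cases hkn : k = pvLast n
          · rw [if_pos hkn]; simp
          · rw [if_neg hkn]
            rw [hg', PySem.Dict.contains_insert] at hk
            rcases Bool.or_eq_true_iff.mp hk with hk1 | hk2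
            · exact absurd (by simpa using hk1) hkn
            · exact hc1 k hk2
        have := ih g' hS' hval' hcross' hc0' hc1'
        rw [hstep]
        intro k
        refine ⟨(this k).1, fun x => ?_⟩
        rw [(this k).2 x, hg'getD k]
        by_cases hk : k = pvLast n
        · rw [if_pos hk]
          constructor
          · rintro (hx | hex)
            · rcases List.mem_append.mp hx with hx' | hx'
              · exact Or.inl (hk ▸ hx')
              · rcases List.mem_singleton.mp hx' with rfl
                exact Or.inr ⟨n, List.mem_cons_self, hk.symm, rfl⟩
            · exact Or.inr (by obtain ⟨m, hm, h1, h2⟩ := hex; exact ⟨m, List.mem_cons_of_mem n hm, h1, h2⟩)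
          · rintro (hx | ⟨m, hm, h1, h2⟩)
            · exact Or.inl (List.mem_append.mpr (Or.inl (hk ▸ hx)))
            · rcases List.mem_cons.mp hm with rfl | hm'
              · exact Or.inl (List.mem_append.mpr (Or.inr (by simp [h2.symm])))
              · exact Or.inr ⟨m, hm', h1, h2⟩
        · rw [if_neg hk]
          constructor
          · rintro (hx | hex)
            · exact Or.inl hx
            · exact Or.inr (by obtain ⟨m, hm, h1, h2⟩ := hex; exact ⟨m, List.mem_cons_of_mem n hm, h1, h2⟩)
          · rintro (hx | ⟨m, hm, h1, h2⟩)
            · exact Or.inl hx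
            · rcases List.mem_cons.mp hm with rfl | hm'
              · exact absurd h1.symm hk
              · exact Or.inr ⟨m, hm', h1, h2⟩
    · -- a fresh last name
      have hc' : g.contains (pvLast n) = false := by simpa using hc
      have hnil : g.getD (pvLast n) [] = [] := hc0 _ hc'
      have hstep : pvStepB g n = g.insert (pvLast n) [pvFirst n] := by
        rw [pvStepB, if_pos (by simp [hc'])]
      set g' := g.insert (pvLast n) [pvFirst n] with hg'
      have hg'getD : ∀ k, g'.getD k []
          = if k = pvLast n then [pvFirst n] else g.getD k [] := by
        intro k
        by_cases hk : k = pvLast n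
        · rw [if_pos hk, hk, hg', PySem.Dict.getD_insert_self]
        · rw [if_neg hk, hg', PySem.Dict.getD_insert_of_ne _ _ _ hk]
      have hval' : ∀ k, (g'.getD k []).Pairwise (· < ·) := by
        intro k
        rw [hg'getD k]
        by_cases hk : k = pvLast n
        · rw [if_pos hk]; exact List.pairwise_singleton _ _
        · rw [if_neg hk]; exact hval k
      have hcross' : ∀ k x, x ∈ g'.getD k [] → ∀ m ∈ S, pvLast m = k → x ≤ pvFirst m := by
        intro k x hx m hm hlm
        rw [hg'getD k] at hx
        by_cases hk : k = pvLast n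
        · rw [if_pos hk] at hx
          rcases List.mem_singleton.mp hx with rfl
          exact hhead m hm (hk ▸ hlm)
        · rw [if_neg hk] at hx
          exact hcross k x hx m (List.mem_cons_of_mem n hm) hlm
      have hc0' : ∀ k, g'.contains k = false → g'.getD k [] = [] := by
        intro k hk
        rw [hg', PySem.Dict.contains_insert] at hk
        rcases Bool.or_eq_false_iff.mp hk with ⟨hk1, hk2⟩
        have hkn : k ≠ pvLast n := by simpa using hk1
        rw [hg'getD k, if_neg hkn]
        exact hc0 k hk2
      have hc1' : ∀ k, g'.contains k = true → g'.getD k [] ≠ [] := by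
        intro k hk
        rw [hg'getD k]
        by_cases hkn : k = pvLast n
        · rw [if_pos hkn]; simp
        · rw [if_neg hkn]
          rw [hg', PySem.Dict.contains_insert] at hk
          rcases Bool.or_eq_true_iff.mp hk with hk1 | hk2
          · exact absurd (by simpa using hk1) hkn
          · exact hc1 k hk2
      have := ih g' hS' hval' hcross' hc0' hc1'
      rw [hstep]
      intro k
      refine ⟨(this k).1, fun x => ?_⟩
      rw [(this k).2 x, hg'getD k]
      by_cases hk : k = pvLast n
      · rw [if_pos hk]
        constructor
        · rintro (hx | hex)
          · rcases List.mem_singleton.mp hx with rfl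
            exact Or.inr ⟨n, List.mem_cons_self, hk.symm, rfl⟩
          · exact Or.inr (by obtain ⟨m, hm, h1, h2⟩ := hex; exact ⟨m, List.mem_cons_of_mem n hm, h1, h2⟩)
        · rintro (hx | ⟨m, hm, h1, h2⟩)
          · exact absurd hx (by rw [hk, hnil]; simp)
          · rcases List.mem_cons.mp hm with rfl | hm'
            · exact Or.inl (by simp [h2.symm])
            · exact Or.inr ⟨m, hm', h1, h2⟩
      · rw [if_neg hk]
        constructor
        · rintro (hx | hex)
          · exact Or.inl hx
          · exact Or.inr (by obtain ⟨m, hm, h1, h2⟩ := hex; exact ⟨m, List.mem_cons_of_mem n hm, h1, h2⟩)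
        · rintro (hx | ⟨m, hm, h1, h2⟩)
          · exact Or.inl hx
          · rcases List.mem_cons.mp hm with rfl | hm'
            · exact absurd h1.symm hk
            · exact Or.inr ⟨m, hm', h1, h2⟩

-- the final re-emit fold: a dict built by inserting a value that is a function of the key
lemma pv_getD_foldl_insert_keyfun (l : List String) (F : String → List String)
    (d : PySem.Dict String (List String)) (k : String) :
    (l.foldl (fun d n => d.insert (pvLast n) (F (pvLast n))) d).getD k []
      = if k ∈ l.map pvLast then F k else d.getD k [] := by
  induction l generalizing d with
  | nil => simp
  | cons n l ih =>
    simp only [List.foldl_cons, List.map_cons, List.mem_cons]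
    rw [ih]
    by_cases hl : k ∈ l.map pvLast
    · simp [hl]
    · by_cases hk : k = pvLast n
      · simp [hk, PySem.Dict.getD_insert_self]
      · simp [hl, hk, PySem.Dict.getD_insert_of_ne _ _ _ hk]

theorem pv_final (ptf : List (String × List String)) :
    get_last_to_first ptf = get_last_to_first_alt ptf := by
  have hA : get_last_to_first ptf = ((pvNamesA ptf).foldl pvStepA PySem.Dict.empty).items := rfl
  have hB : get_last_to_first_alt ptf
      = ((pvNamesB ptf).foldl (fun d n =>
            d.insert (pvLast n)
              (((((pvNamesB ptf).foldl (fun acc x => PySem.List.insertBy pvBf x acc) []).foldl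
                  pvStepB PySem.Dict.empty).get? (pvLast n)).getD [])) PySem.Dict.empty).items := rfl
  set NA := pvNamesA ptf with hNA
  set NB := pvNamesB ptf with hNB
  set S := NB.foldl (fun acc x => PySem.List.insertBy pvBf x acc) [] with hSdef
  set grouped := S.foldl pvStepB PySem.Dict.empty with hgrouped
  set dA := NA.foldl pvStepA PySem.Dict.empty with hdA
  set dB := NB.foldl (fun d n =>
      d.insert (pvLast n) ((grouped.get? (pvLast n)).getD [])) PySem.Dict.empty with hdB
  rw [hA, hB]
  -- the sorted name list: ordered by (last, first) and a rearrangement of NB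
  have hS_pw : S.Pairwise pvRle := pv_sorted2_pairwise_gen NB [] (List.Pairwise.nil)
  have hS_perm : S.Perm NB := by
    have := PySem.List.foldl_insertBy_perm pvBf NB []
    simpa using this
  -- B's grouping pass: per-key strictly increasing lists holding exactly the firsts
  have hg := pv_group_char S PySem.Dict.empty hS_pw
    (fun k => by simp) (fun k x hx => by simp at hx) (fun k _ => by simp)
    (fun k hk => by simp [PySem.Dict.contains_empty] at hk)
  have hYpw : ∀ k, (grouped.getD k []).Pairwise (· < ·) := fun k => (hg k).1
  have hYmem : ∀ k x, x ∈ grouped.getD k [] ↔ ∃ n ∈ NB, pvLast n = k ∧ pvFirst n = x := by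
    intro k x
    rw [(hg k).2 x]
    simp only [PySem.Dict.getD_empty, List.not_mem_nil, false_or]
    constructor
    · rintro ⟨n, hn, h1, h2⟩; exact ⟨n, hS_perm.mem_iff.mp hn, h1, h2⟩
    · rintro ⟨n, hn, h1, h2⟩; exact ⟨n, hS_perm.mem_iff.mpr hn, h1, h2⟩
  -- A's dict: the per-key-sorted view of the first-name sets
  obtain ⟨hKeq, hVeq⟩ := pv_invAS NA PySem.Dict.empty PySem.Dict.empty rfl (fun k => rfl)
  obtain ⟨hKA, hVA⟩ := pv_charS NA PySem.Dict.empty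
  have hmem : ∀ n : String, n ∈ NA ↔ n ∈ NB := by
    intro n
    rw [← PySem.Set.mem_ofList NA n, pv_names_ofList, PySem.Set.mem_ofList]
  -- per-key values agree
  have hvalEq : ∀ k, dA.getD k [] = grouped.getD k [] := by
    intro k
    rw [hVeq k, hVA k]
    rw [show (PySem.Dict.empty : PySem.Dict String (PySem.Set String)).getD k [] = [] from rfl,
      PySem.Set.update_nil_left]
    refine PySem.List.sorted_eq_of_perm_of_pairwise_lt _ _ (fun x => x) ?_ (hYpw k)
    have hnd1 : (grouped.getD k []).Nodup := (hYpw k).imp (fun h => ne_of_lt h)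
    rw [List.perm_ext_iff_of_nodup hnd1 (PySem.Set.nodup_ofList _)]
    intro x
    rw [hYmem k x, PySem.Set.mem_ofList]
    simp only [List.mem_map, List.mem_filter, beq_iff_eq]
    constructor
    · rintro ⟨n, hn, h1, h2⟩; exact ⟨n, ⟨(hmem n).mpr hn, h1⟩, h2⟩
    · rintro ⟨n, ⟨hn, h1⟩, h2⟩; exact ⟨n, (hmem n).mp hn, h1, h2⟩
  -- keys agree (first-occurrence order of the last names)
  have hkA : dA.keys = PySem.Set.ofList (NA.map pvLast) := by
    rw [hKeq, hKA]
    rw [show (PySem.Dict.empty : PySem.Dict String (PySem.Set String)).keys = [] from rfl,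
      PySem.Set.update_nil_left]
  have hkB : dB.keys = PySem.Set.ofList (NB.map pvLast) := by
    rw [hdB, PySem.Dict.keys_foldl_insert_key NB (fun n => pvLast n)
      (fun d n => ((grouped.get? (pvLast n)).getD [])) PySem.Dict.empty]
    rw [show (PySem.Dict.empty : PySem.Dict String (List String)).keys = [] from rfl,
      PySem.Set.update_nil_left]
  have hkeysEq : PySem.Set.ofList (NA.map pvLast) = PySem.Set.ofList (NB.map pvLast) := by
    calc PySem.Set.ofList (NA.map pvLast)
        = PySem.Set.ofList ((PySem.List.dedup NA).map pvLast) := (pv_ofList_map_dedup _ _).symm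
      _ = PySem.Set.ofList ((PySem.List.dedup NB).map pvLast) := by
          rw [PySem.List.dedup_eq_ofList, PySem.List.dedup_eq_ofList, hNA, hNB, pv_names_ofList]
      _ = PySem.Set.ofList (NB.map pvLast) := pv_ofList_map_dedup _ _
  have hndA : dA.keys.Nodup := by rw [hkA]; exact PySem.Set.nodup_ofList _
  have hndB : dB.keys.Nodup := by rw [hkB]; exact PySem.Set.nodup_ofList _
  -- assemble the items lists
  rw [PySem.Dict.items_eq_map_keys dA hndA [], PySem.Dict.items_eq_map_keys dB hndB []]
  rw [show dA.keys = dB.keys from hkA.trans (hkeysEq.trans hkB.symm)]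
  apply List.map_congr_left
  intro k hkmem
  have hkNB : k ∈ NB.map pvLast := by
    rw [hkB] at hkmem
    exact (PySem.Set.mem_ofList _ _).mp hkmem
  have hdbv : dB.getD k [] = if k ∈ NB.map pvLast
      then ((grouped.get? k).getD []) else (PySem.Dict.empty : PySem.Dict String (List String)).getD k [] :=
    pv_getD_foldl_insert_keyfun NB (fun k => ((grouped.get? k).getD [])) PySem.Dict.empty k
  have : dB.getD k [] = grouped.getD k [] := by
    rw [hdbv, if_pos hkNB, ← PySem.Dict.getD_eq_get?_getD]
  rw [this, hvalEq k]
-- ===== VERDICT (by name: the statement is the Claim_ definition above) =====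
theorem get_last_to_first_spec : Claim_equal_get_last_to_first := by
  intro ptf _
  unfold Spec_get_last_to_first
  exact pv_final ptf
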